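-- pv_equiv track=rewrite | github.com/ayukyo/alltoolkit | Python/verhoeff_utils/mod.py | detect_transposition_error
-- ===== SOURCE A (Python) =====
-- from typing import Tuple, Optional, List
--
-- def detect_transposition_error(original: str, modified: str) -> Optional[Tuple[int, int]]:
--     """
--     Detect if there's an adjacent digit transposition error.
--
--     Args:
--         original: The original validated number.
--         modified: The potentially modified number.
--
--     Returns:
--         Optional[Tuple[int, int]]: (position1, position2) of transposed digits if detected, None otherwise.
--
--     Examples:
--         >>> detect_transposition_error("123451", "124351")
--         (2, 3)
--         >>> detect_transposition_error("123451", "123451")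
--         None
--     """
--     if len(original) != len(modified):
--         return None
--
--     differences = []
--     for i, (o, m) in enumerate(zip(original, modified)):
--         if o != m:
--             differences.append(i)
--
--     # Check if exactly two adjacent positions are swapped
--     if len(differences) == 2:
--         i, j = differences
--         if j == i + 1:  # Must be adjacent
--             if original[i] == modified[j] and original[j] == modified[i]:
--                 return (i, j)
--
--     return None
-- ===== SOURCE B (Python) =====
-- def _common_prefix_len(a, b):
--     k = 0
--     while k < len(a) and a[k] == b[k]:
--         k += 1
--     return k
--
--
-- def detect_transposition_error(original, modified):
--     if len(original) != len(modified):
--         return None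
--     n = len(original)
--     p = _common_prefix_len(original, modified)
--     s = min(_common_prefix_len(original[::-1], modified[::-1]), n - p)
--     if (n - p - s == 2
--             and original[p] == modified[p + 1]
--             and original[p + 1] == modified[p]):
--         return (p, p + 1)
--     return None
-- ===== Notes on version B (the rewrite author's own statement) =====
-- stated objective: alternative
-- what changed: Instead of collecting the list of every differing index and inspecting it, B trims the common prefix and the common suffix (via the reversed strings) and checks that the remaining window has length exactly 2 and is swapped.
import Mathlib
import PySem

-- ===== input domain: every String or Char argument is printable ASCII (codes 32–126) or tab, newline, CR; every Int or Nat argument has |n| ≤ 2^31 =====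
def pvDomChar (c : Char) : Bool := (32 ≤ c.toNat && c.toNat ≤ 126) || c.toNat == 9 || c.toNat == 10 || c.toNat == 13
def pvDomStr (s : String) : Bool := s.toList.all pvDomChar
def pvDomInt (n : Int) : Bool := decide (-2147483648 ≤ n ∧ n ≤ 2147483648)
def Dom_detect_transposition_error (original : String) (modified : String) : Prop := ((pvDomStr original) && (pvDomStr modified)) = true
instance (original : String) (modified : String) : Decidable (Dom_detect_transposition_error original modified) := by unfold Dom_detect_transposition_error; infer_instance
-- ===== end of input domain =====

-- B replaces A's collect-every-difference pass by trimming the common prefix and the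
-- common suffix (via the reversed strings) and testing that the remaining window has
-- length 2 and is swapped (objective: alternative decomposition).

-- ===== PORT A =====
-- A's loop: collect the indices where the zipped characters differ ('differences').
def pvDiffs (os ms : List Char) (i : Int) : List Int :=
  match os, ms with
  | o :: os', m :: ms' =>
      if o ≠ m then i :: pvDiffs os' ms' (i + 1) else pvDiffs os' ms' (i + 1)
  | _, _ => []

-- A's body after the length guard, on the character lists (indices are always in
-- range here, so the option equality of pyGet? is exactly Python's char comparison).
def pvCoreA (os ms : List Char) : Option (Int × Int) :=
  match pvDiffs os ms 0 with
  | [i, j] =>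
      if j = i + 1 then
        if PySem.List.pyGet? os i = PySem.List.pyGet? ms j ∧
           PySem.List.pyGet? os j = PySem.List.pyGet? ms i then some (i, j) else none
      else none
  | _ => none

def detect_transposition_error (original : String) (modified : String) : Option (Int × Int) :=
  if original.toList.length ≠ modified.toList.length then none
  else pvCoreA original.toList modified.toList

-- ===== PORT B =====
-- Source B's _common_prefix_len: the while loop advancing k while the characters agree
-- (only ever called on equal-length sequences, where this recursion is exact).
def pvPrefLen : List Char → List Char → Nat
  | a :: as, b :: bs => if a = b then pvPrefLen as bs + 1 else 0
  | _, _ => 0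

-- Source B's body after the length guard: p = common prefix, s = common suffix of the
-- reversed strings capped at n - p, then the length-2-window swap test.
-- (Source B's locals inlined: n = os.length, p = pvPrefLen os ms,
--  s = min (pvPrefLen os.reverse ms.reverse) (n - p))
def pvCoreB (os ms : List Char) : Option (Int × Int) :=
  if (os.length : Int) - pvPrefLen os ms
       - min (pvPrefLen os.reverse ms.reverse) (os.length - pvPrefLen os ms) = 2 ∧
     PySem.List.pyGet? os (pvPrefLen os ms : Int) =
       PySem.List.pyGet? ms ((pvPrefLen os ms : Int) + 1) ∧
     PySem.List.pyGet? os ((pvPrefLen os ms : Int) + 1) =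
       PySem.List.pyGet? ms (pvPrefLen os ms : Int)
  then some ((pvPrefLen os ms : Int), (pvPrefLen os ms : Int) + 1) else none

def detect_transposition_error_alt (original : String) (modified : String) : Option (Int × Int) :=
  if original.toList.length ≠ modified.toList.length then none
  else pvCoreB original.toList modified.toList

-- ===== PRECONDITION & SPEC =====
def Spec_detect_transposition_error (original : String) (modified : String) (out : Option (Int × Int)) : Prop := out = detect_transposition_error_alt original modified
instance (original : String) (modified : String) (out : Option (Int × Int)) : Decidable (Spec_detect_transposition_error original modified out) := by unfold Spec_detect_transposition_error; infer_instance

-- ===== CLAIM (what is proved, stated in full; the proofs are below) =====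
def Claim_equal_detect_transposition_error : Prop := ∀ (original : String) (modified : String), Dom_detect_transposition_error original modified → Spec_detect_transposition_error original modified (detect_transposition_error original modified)

-- ===== LEMMAS AND PROOFS =====

lemma pvDiffs_mem_iff (os : List Char) : ∀ (ms : List Char) (i x : Int),
    x ∈ pvDiffs os ms i ↔
      ∃ k : Nat, x = i + k ∧ k < os.length ∧ k < ms.length ∧ os[k]? ≠ ms[k]? := by
  induction os with
  | nil => intro ms i x; simp [pvDiffs]
  | cons o os ih =>
    intro ms i x
    cases ms with
    | nil => simp [pvDiffs]
    | cons m ms =>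
      simp only [pvDiffs]
      constructor
      · intro h
        by_cases hom : o = m
        · rw [if_neg (by simp [hom])] at h
          obtain ⟨k, hk1, hk2, hk3, hk4⟩ := (ih ms (i + 1) x).mp h
          exact ⟨k + 1, by push_cast; omega, by simp; omega, by simp; omega,
            by simpa using hk4⟩
        · rw [if_pos hom] at h
          rcases List.mem_cons.mp h with rfl | h
          · exact ⟨0, by omega, by simp, by simp, by simpa using hom⟩
          · obtain ⟨k, hk1, hk2, hk3, hk4⟩ := (ih ms (i + 1) x).mp h
            exact ⟨k + 1, by push_cast; omega, by simp; omega, by simp; omega,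
              by simpa using hk4⟩
      · rintro ⟨k, hk1, hk2, hk3, hk4⟩
        cases k with
        | zero =>
          simp only [List.getElem?_cons_zero, ne_eq, Option.some.injEq] at hk4
          rw [if_pos hk4]
          exact List.mem_cons.mpr (Or.inl (by omega))
        | succ k =>
          have hmem : x ∈ pvDiffs os ms (i + 1) :=
            (ih ms (i + 1) x).mpr ⟨k, by push_cast at hk1 ⊢; omega,
              by simpa using hk2, by simpa using hk3, by simpa using hk4⟩
          split
          · exact List.mem_cons.mpr (Or.inr hmem)
          · exact hmem

lemma pvDiffs_mem_le {os ms : List Char} {i x : Int} (h : x ∈ pvDiffs os ms i) : i ≤ x := by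
  obtain ⟨k, hk, -⟩ := (pvDiffs_mem_iff os ms i x).mp h
  omega

lemma pvDiffs_pairwise (os : List Char) : ∀ (ms : List Char) (i : Int),
    (pvDiffs os ms i).Pairwise (· < ·) := by
  induction os with
  | nil => intro ms i; simp [pvDiffs]
  | cons o os ih =>
    intro ms i
    cases ms with
    | nil => simp [pvDiffs]
    | cons m ms =>
      simp only [pvDiffs]
      split
      · exact List.pairwise_cons.mpr ⟨fun x hx => by have := pvDiffs_mem_le hx; omega, ih _ _⟩
      · exact ih _ _

lemma pvPrefLen_le (a : List Char) : ∀ b : List Char,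
    pvPrefLen a b ≤ a.length ∧ pvPrefLen a b ≤ b.length := by
  induction a with
  | nil => intro b; simp [pvPrefLen]
  | cons x xs ih =>
    intro b
    cases b with
    | nil => simp [pvPrefLen]
    | cons y ys =>
      simp only [pvPrefLen, List.length_cons]
      split
      · have := ih ys; omega
      · omega

lemma pvPrefLen_before (a : List Char) : ∀ (b : List Char) (k : Nat),
    k < pvPrefLen a b → a[k]? = b[k]? := by
  induction a with
  | nil => intro b k h; simp [pvPrefLen] at h
  | cons x xs ih =>
    intro b k h
    cases b with
    | nil => simp [pvPrefLen] at h
    | cons y ys =>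
      simp only [pvPrefLen] at h
      split at h
      · cases k with
        | zero => simp_all
        | succ k => simpa using ih ys k (by omega)
      · omega

lemma pvPrefLen_ne_at (a : List Char) : ∀ b : List Char,
    pvPrefLen a b < a.length → pvPrefLen a b < b.length →
    a[pvPrefLen a b]? ≠ b[pvPrefLen a b]? := by
  induction a with
  | nil => intro b h _; simp at h
  | cons x xs ih =>
    intro b h1 h2
    cases b with
    | nil => simp at h2
    | cons y ys =>
      simp only [pvPrefLen] at h1 h2 ⊢
      split
      · rename_i hxy
        simp only [List.length_cons] at h1 h2
        rw [if_pos hxy] at h1 h2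
        simpa using ih ys (by omega) (by omega)
      · rename_i hxy
        simpa using hxy

lemma pvPrefLen_full {os ms : List Char} (h : os.length = ms.length)
    (hp : pvPrefLen os ms = os.length) : os = ms := by
  apply List.ext_getElem?
  intro k
  by_cases hk : k < os.length
  · exact pvPrefLen_before os ms k (by omega)
  · rw [List.getElem?_eq_none (by omega), List.getElem?_eq_none (by omega)]

lemma pvPair_eq {l : List Int} (hpw : l.Pairwise (· < ·)) (p : Int)
    (hp : p ∈ l) (hq : p + 1 ∈ l) (hall : ∀ x ∈ l, p ≤ x ∧ x ≤ p + 1) :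
    l = [p, p + 1] := by
  cases l with
  | nil => simp at hp
  | cons a t =>
    cases t with
    | nil =>
      simp only [List.mem_singleton] at hp hq
      omega
    | cons b t =>
      have hab : a < b := (List.pairwise_cons.mp hpw).1 b (by simp)
      have ht : ∀ x ∈ t, b < x := (List.pairwise_cons.mp (List.pairwise_cons.mp hpw).2).1
      have ha := hall a (by simp)
      have hb := hall b (by simp)
      have hpv : a = p := by
        rcases List.mem_cons.mp hp with h1 | h1
        · omega
        · rcases List.mem_cons.mp h1 with h2 | h2
          · omega
          · have := ht p h2; omega
      have hqv : b = p + 1 := by omega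
      cases t with
      | nil => simp [hpv, hqv]
      | cons c t =>
        have hbc : b < c := (List.pairwise_cons.mp (List.pairwise_cons.mp hpw).2).1 c (by simp)
        have := hall c (by simp)
        omega

lemma pvCore_eq {os ms : List Char} (h : os.length = ms.length) :
    pvCoreA os ms = pvCoreB os ms := by
  set n := os.length with hn
  set p := pvPrefLen os ms with hpdef
  have hple : p ≤ n ∧ p ≤ ms.length := pvPrefLen_le os ms
  by_cases hpn : p = n
  · -- no difference at all: both sides are none
    have heq : os = ms := pvPrefLen_full h hpn
    have hdiffs : pvDiffs os ms 0 = [] := by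
      cases hd : pvDiffs os ms 0 with
      | nil => rfl
      | cons a t =>
        obtain ⟨k, -, hk2, -, hk4⟩ := (pvDiffs_mem_iff os ms 0 a).mp (hd ▸ List.mem_cons_self ..)
        exact absurd (heq ▸ rfl) hk4
    unfold pvCoreA pvCoreB
    rw [hdiffs]
    rw [if_neg]
    rintro ⟨h1, -⟩
    rw [← hpdef, hpn] at h1
    omega
  · -- there is a difference: locate first (p) and last (j) differing positions
    have hplt : p < n := by omega
    have hpdiff : os[p]? ≠ ms[p]? := pvPrefLen_ne_at os ms hplt (by omega)
    set q := pvPrefLen os.reverse ms.reverse with hqdef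
    have hqle : q ≤ n := by
      have := pvPrefLen_le os.reverse ms.reverse
      simpa [← hqdef] using this.1
    have hrev : ∀ k : Nat, k < q → os[n - 1 - k]? = ms[n - 1 - k]? := by
      intro k hk
      have := pvPrefLen_before os.reverse ms.reverse k (by rw [← hqdef]; omega)
      rwa [List.getElem?_reverse (show k < os.length by omega),
           List.getElem?_reverse (show k < ms.length by omega), ← h] at this
    have hqlt : q < n := by
      rcases Nat.lt_or_ge q n with hq | hq
      · exact hq
      · exact absurd (hrev (n - 1 - p) (by omega)) (by
          rw [show n - 1 - (n - 1 - p) = p by omega]; exact hpdiff)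
    set j := n - 1 - q with hjdef
    have hjdiff : os[j]? ≠ ms[j]? := by
      have := pvPrefLen_ne_at os.reverse ms.reverse
        (by rw [← hqdef]; simpa using hqlt) (by rw [← hqdef]; simp; omega)
      rw [← hqdef] at this
      rwa [List.getElem?_reverse (show q < os.length by omega),
           List.getElem?_reverse (show q < ms.length by omega), ← h, ← hjdef] at this
    have hmin : ∀ k : Nat, k < n → os[k]? ≠ ms[k]? → p ≤ k := by
      intro k _ hne
      by_contra hc
      exact hne (pvPrefLen_before os ms k (by omega))
    have hmax : ∀ k : Nat, k < n → os[k]? ≠ ms[k]? → k ≤ j := by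
      intro k hk hne
      by_contra hc
      exact hne (by
        have := hrev (n - 1 - k) (by omega)
        rwa [show n - 1 - (n - 1 - k) = k by omega] at this)
    have hpj : p ≤ j := hmin j (by omega) hjdiff
    have hs : min q (n - p) = q := by omega
    have hmemp : (p : Int) ∈ pvDiffs os ms 0 :=
      (pvDiffs_mem_iff os ms 0 p).mpr ⟨p, by omega, hplt, by omega, hpdiff⟩
    have hmemj : (j : Int) ∈ pvDiffs os ms 0 :=
      (pvDiffs_mem_iff os ms 0 j).mpr ⟨j, by omega, by omega, by omega, hjdiff⟩
    have hbound : ∀ x ∈ pvDiffs os ms 0, (p : Int) ≤ x ∧ x ≤ (j : Int) := by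
      intro x hx
      obtain ⟨k, rfl, hk2, hk3, hk4⟩ := (pvDiffs_mem_iff os ms 0 x).mp hx
      have h1 := hmin k (by omega) hk4
      have h2 := hmax k (by omega) hk4
      omega
    unfold pvCoreA pvCoreB
    rw [← hpdef, ← hqdef, ← hn, hs]

    by_cases hj : j = p + 1
    · -- exactly an adjacent pair differs: the two tests coincide literally
      have hl : pvDiffs os ms 0 = [(p : Int), (p : Int) + 1] :=
        pvPair_eq (pvDiffs_pairwise os ms 0) p hmemp (by exact_mod_cast hj ▸ hmemj)
          (fun x hx => by have := hbound x hx; omega)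
      rw [hl]
      show (if ((p : Int) + 1 = (p : Int) + 1) then
          if PySem.List.pyGet? os (p : Int) = PySem.List.pyGet? ms ((p : Int) + 1) ∧
             PySem.List.pyGet? os ((p : Int) + 1) = PySem.List.pyGet? ms (p : Int)
          then some ((p : Int), (p : Int) + 1) else none
        else none) = _
      rw [if_pos rfl]
      have hcond : (n : Int) - (p : Int) - (q : Int) = 2 := by omega
      by_cases hc : PySem.List.pyGet? os (p : Int) = PySem.List.pyGet? ms ((p : Int) + 1) ∧
          PySem.List.pyGet? os ((p : Int) + 1) = PySem.List.pyGet? ms (p : Int)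
      · rw [if_pos hc, if_pos ⟨hcond, hc⟩]
      · rw [if_neg hc, if_neg (by rintro ⟨-, h2, h3⟩; exact hc ⟨h2, h3⟩)]
    · -- window is not an adjacent pair: both sides are none
      have hBnone : ¬ ((n : Int) - (p : Int) - (q : Int) = 2 ∧
          PySem.List.pyGet? os (p : Int) = PySem.List.pyGet? ms ((p : Int) + 1) ∧
          PySem.List.pyGet? os ((p : Int) + 1) = PySem.List.pyGet? ms (p : Int)) := by
        rintro ⟨h1, -⟩
        omega
      rw [if_neg hBnone]
      rcases hd : pvDiffs os ms 0 with _ | ⟨a, _ | ⟨b, _ | ⟨c, t⟩⟩⟩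
      · rfl
      · rfl
      · -- two differences: they must be p and j, which are not adjacent here
        have hab : a < b := by
          have := pvDiffs_pairwise os ms 0
          rw [hd] at this
          exact (List.pairwise_cons.mp this).1 b (by simp)
        have hpa : a = (p : Int) := by
          have hpm := hmemp; rw [hd] at hpm
          have h1 := hbound a (by rw [hd]; simp)
          rcases List.mem_cons.mp hpm with h2 | h2
          · omega
          · simp only [List.mem_singleton] at h2
            have h3 := hbound b (by rw [hd]; simp)
            omega
        have hjb : b = (j : Int) := by
          have hjm := hmemj; rw [hd] at hjm
          have h2 := hbound b (by rw [hd]; simp)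
          rcases List.mem_cons.mp hjm with h3 | h3
          · have h1 := hbound a (by rw [hd]; simp); omega
          · simp only [List.mem_singleton] at h3; omega
        show (if (b = a + 1) then
            if PySem.List.pyGet? os a = PySem.List.pyGet? ms b ∧
               PySem.List.pyGet? os b = PySem.List.pyGet? ms a
            then some (a, b) else none
          else none) = none
        rw [if_neg (by rw [hpa, hjb]; intro hcon; exact hj (by exact_mod_cast hcon))]
      · rfl

-- ===== VERDICT (by name: the statement is the Claim_ definition above) =====
theorem detect_transposition_error_spec : Claim_equal_detect_transposition_error := by
  intro original modified _
  unfold Spec_detect_transposition_error detect_transposition_error detect_transposition_error_alt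
  split_ifs with h
  · rfl
  · exact pvCore_eq (not_not.mp h)
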